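-- pv_equiv track=rewrite | github.com/YohansHailu/competitive_programming | week7/maximum_sum_of_two_sub_arrays.py | max_window
-- ===== SOURCE A (Python) =====
-- def max_window(arr,Len,av_index=-1,av_len=0):
--     # av_index -1 to not to do
--     f_max = 0
--     w_sum = 0
--     left = 0
--     right = 0
--     while right <len(arr):
--         if right == av_index:
--             right += av_len
--             left = right
--             w_sum = 0
--
--         if right >= len(arr):
--             continue
--
--         w_sum += arr[right]
--         while (right-left+1) > Len:
--             w_sum -= arr[left]
--             left += 1
--
--         f_max = max(w_sum,f_max)
--         right += 1
--
--     return f_max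
-- ===== SOURCE B (Python) =====
-- def max_window(arr, Len, av_index=-1, av_len=0):
--     n = len(arr)
--     # prefix sums: P[i] = sum of arr[:i]
--     P = [0]
--     s = 0
--     for x in arr:
--         s += x
--         P.append(s)
--     barrier = 0 <= av_index < n
--     best = 0
--     for right in range(n):
--         if barrier and av_index <= right < av_index + av_len:
--             continue  # removed region
--         seg = av_index + av_len if (barrier and right >= av_index) else 0
--         left = max(seg, right - Len + 1)
--         best = max(best, P[right + 1] - P[left])
--     return best
-- ===== Notes on version B (the rewrite author's own statement) =====
-- stated objective: alternative
-- what changed: B precomputes a prefix-sum table and, in a single index loop that skips the removed region, reads each window sum as P[right+1]-P[max(segment_start, right-Len+1)], replacing A's running-sum sliding window with a shrinking left pointer and in-loop barrier jump/reset.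
import Mathlib
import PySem

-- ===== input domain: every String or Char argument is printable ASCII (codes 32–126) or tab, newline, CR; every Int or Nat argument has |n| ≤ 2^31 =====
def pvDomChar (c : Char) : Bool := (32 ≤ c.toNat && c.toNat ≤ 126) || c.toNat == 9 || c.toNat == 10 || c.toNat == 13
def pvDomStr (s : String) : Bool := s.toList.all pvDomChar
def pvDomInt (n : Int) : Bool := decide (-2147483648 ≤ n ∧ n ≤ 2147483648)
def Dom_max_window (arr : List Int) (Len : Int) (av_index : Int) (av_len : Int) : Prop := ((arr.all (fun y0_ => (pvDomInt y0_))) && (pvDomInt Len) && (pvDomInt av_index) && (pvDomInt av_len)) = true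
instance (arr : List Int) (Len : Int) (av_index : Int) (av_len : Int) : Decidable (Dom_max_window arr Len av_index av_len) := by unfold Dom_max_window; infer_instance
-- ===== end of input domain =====

-- B replaces A's running-sum sliding window (shrinking left pointer, in-loop barrier jump)
-- by a prefix-sum table read once per index; return values proved equal on Pre_.

-- ===== PORT A =====
-- inner 'while (right-left+1) > Len' loop of A; fuel is an upper bound on its
-- iteration count (inside Pre_ it never runs out)
def innerA (arr : List Int) (Len right : Int) : Nat → Int → Int → Int × Int
  | 0, w, l => (w, l)
  | fuel + 1, w, l =>
    if Len < right - l + 1 then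
      innerA arr Len right fuel (w - arr.getD l.toNat 0) (l + 1)
    else (w, l)

-- outer 'while right < len(arr)' loop of A, state (f_max, w_sum, left, right);
-- fuel bounds the iteration count (inside Pre_ it never runs out)
def outerA (arr : List Int) (Len av_index av_len : Int) : Nat → Int → Int → Int → Int → Int
  | 0, f, _, _, _ => f
  | fuel + 1, f, w, l, r =>
    if r < (arr.length : Int) then
      -- 'if right == av_index': new (w_sum, left, right)
      let s := if r = av_index then ((0 : Int), r + av_len, r + av_len) else (w, l, r)
      if (arr.length : Int) ≤ s.2.2 then
        -- 'continue': the while condition now fails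
        outerA arr Len av_index av_len fuel f s.1 s.2.1 s.2.2
      else
        let w1 := s.1 + arr.getD s.2.2.toNat 0
        let p := innerA arr Len s.2.2 (arr.length + 1) w1 s.2.1
        outerA arr Len av_index av_len fuel (max p.1 f) p.1 p.2 (s.2.2 + 1)
    else f

def max_window (arr : List Int) (Len : Int) (av_index : Int) (av_len : Int) : Int :=
  outerA arr Len av_index av_len (arr.length + 2) 0 0 0 0

-- ===== PORT B =====
-- the P/s loop of Source B: prefix sums, P[i] = sum(arr[:i])
def prefixB (arr : List Int) : List Int × Int :=
  arr.foldl (fun acc x => (acc.1 ++ [acc.2 + x], acc.2 + x)) ([0], 0)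

-- Source B's P[k] reads are in range on Pre_; ported with getD (default never used there)
def max_window_alt (arr : List Int) (Len : Int) (av_index : Int) (av_len : Int) : Int :=
  let P := (prefixB arr).1
  let barrier : Bool := decide (0 ≤ av_index ∧ av_index < (arr.length : Int))
  (List.range arr.length).foldl (fun (best : Int) (r : Nat) =>
    if barrier = true ∧ av_index ≤ (r : Int) ∧ (r : Int) < av_index + av_len then best
    else
      let seg := if barrier = true ∧ av_index ≤ (r : Int) then av_index + av_len else 0
      let left := max seg ((r : Int) - Len + 1)
      max best (P.getD (r + 1) 0 - P.getD left.toNat 0)) 0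

-- ===== PRECONDITION & SPEC =====
-- Pre_ excludes only inputs where A does not return: Len < 0 on a nonempty arr
-- (A's inner loop drains past the end of arr and raises IndexError), and
-- av_len < 0 with av_index inside the array (A's barrier re-triggers forever).
def Pre_max_window (arr : List Int) (Len : Int) (av_index : Int) (av_len : Int) : Prop :=
  (0 ≤ Len ∨ arr = []) ∧ (0 ≤ av_len ∨ ¬ (0 ≤ av_index ∧ av_index < (arr.length : Int)))
instance (arr : List Int) (Len : Int) (av_index : Int) (av_len : Int) : Decidable (Pre_max_window arr Len av_index av_len) := by unfold Pre_max_window; infer_instance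

def pvWitness_max_window : List Int × Int × Int × Int := ([1, -2, 3, 4], 2, 1, 1)

def Spec_max_window (arr : List Int) (Len : Int) (av_index : Int) (av_len : Int) (out : Int) : Prop := out = max_window_alt arr Len av_index av_len
instance (arr : List Int) (Len : Int) (av_index : Int) (av_len : Int) (out : Int) : Decidable (Spec_max_window arr Len av_index av_len out) := by unfold Spec_max_window; infer_instance

-- ===== CLAIM (what is proved, stated in full; the proofs are below) =====
def Claim_equal_max_window : Prop := ∀ (arr : List Int) (Len : Int) (av_index : Int) (av_len : Int), Dom_max_window arr Len av_index av_len → Pre_max_window arr Len av_index av_len → Spec_max_window arr Len av_index av_len (max_window arr Len av_index av_len)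

-- ===== LEMMAS AND PROOFS =====

-- sum of the first i elements (i an Int, clamped like a nonnegative index)
def sTake (arr : List Int) (i : Int) : Int := (arr.take i.toNat).sum

-- segment start used by B, as a function
def segB (arr : List Int) (av_index av_len : Int) (r : Int) : Int :=
  if (0 ≤ av_index ∧ av_index < (arr.length : Int)) ∧ av_index ≤ r then av_index + av_len else 0

-- B's loop body, with prefix-sum reads replaced by sTake
def bstep (arr : List Int) (Len av_index av_len : Int) (best : Int) (r : Nat) : Int :=
  if (0 ≤ av_index ∧ av_index < (arr.length : Int)) ∧ av_index ≤ (r : Int) ∧ (r : Int) < av_index + av_len then best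
  else max best (sTake arr ((r : Int) + 1) - sTake arr (max (segB arr av_index av_len (r : Int)) ((r : Int) - Len + 1)))

def scanB (s : Int) : List Int → List Int
  | [] => []
  | x :: xs => (s + x) :: scanB (s + x) xs

theorem prefixB_foldl : ∀ (arr : List Int) (P0 : List Int) (s : Int),
    arr.foldl (fun acc x => (acc.1 ++ [acc.2 + x], acc.2 + x)) (P0, s) = (P0 ++ scanB s arr, s + arr.sum) := by
  intro arr
  induction arr with
  | nil => intro P0 s; simp [scanB]
  | cons x xs ih =>
      intro P0 s
      simp only [List.foldl_cons, scanB, List.sum_cons]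
      rw [ih]
      simp [List.append_assoc]
      ring

theorem scanB_getD : ∀ (arr : List Int) (s : Int) (k : Nat), k < arr.length →
    (scanB s arr).getD k 0 = s + (arr.take (k + 1)).sum := by
  intro arr
  induction arr with
  | nil => intro s k h; simp at h
  | cons x xs ih =>
      intro s k h
      cases k with
      | zero => simp [scanB]
      | succ k =>
          simp only [scanB, List.getD_cons_succ, List.take_succ_cons, List.sum_cons]
          rw [ih (s + x) k (by simpa using h)]
          ring

theorem prefixB_getD (arr : List Int) (k : Nat) (hk : k ≤ arr.length) :
    (prefixB arr).1.getD k 0 = sTake arr (k : Int) := by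
  have h := prefixB_foldl arr [0] 0
  unfold prefixB
  rw [h]
  cases k with
  | zero => simp [sTake]
  | succ k =>
      have hk' : k < arr.length := by omega
      simp only [List.cons_append, List.nil_append, List.getD_cons_succ]
      rw [scanB_getD arr 0 k hk']
      simp [sTake]

theorem sTake_succ (arr : List Int) (l : Int) (h0 : 0 ≤ l) (hn : l < (arr.length : Int)) :
    sTake arr (l + 1) = sTake arr l + arr.getD l.toNat 0 := by
  have hln : l.toNat < arr.length := by omega
  have h1 : (l + 1).toNat = l.toNat + 1 := by omega
  unfold sTake
  rw [h1]
  rw [List.getD_eq_getElem?_getD, List.getElem?_eq_getElem hln]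
  rw [List.sum_take_succ arr l.toNat hln]
  rfl

theorem innerA_eq (arr : List Int) (Len r : Int) (hLen : 0 ≤ Len) (hr : r + 1 ≤ (arr.length : Int)) :
    ∀ (fuel : Nat) (w l : Int), 0 ≤ l → l ≤ r + 1 → (r + 1 - l).toNat ≤ fuel →
    w = sTake arr (r + 1) - sTake arr l →
    innerA arr Len r fuel w l = (sTake arr (r + 1) - sTake arr (max l (r + 1 - Len)), max l (r + 1 - Len)) := by
  intro fuel
  induction fuel with
  | zero =>
      intro w l h0 h1 hf hw
      have hl : l = r + 1 := by omega
      have hm : max l (r + 1 - Len) = l := by omega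
      simp [innerA, hm, hw]
  | succ fuel ih =>
      intro w l h0 h1 hf hw
      simp only [innerA]
      by_cases hc : Len < r - l + 1
      · rw [if_pos hc]
        have hln : l < (arr.length : Int) := by omega
        have hst : sTake arr (l + 1) = sTake arr l + arr.getD l.toNat 0 := sTake_succ arr l h0 hln
        have hw' : w - arr.getD l.toNat 0 = sTake arr (r + 1) - sTake arr (l + 1) := by
          rw [hst, hw]; ring
        rw [ih _ _ (by omega) (by omega) (by omega) hw']
        have : max (l + 1) (r + 1 - Len) = max l (r + 1 - Len) := by omega
        rw [this]
      · rw [if_neg hc]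
        have hm : max l (r + 1 - Len) = l := by omega
        rw [hm, hw]

theorem outerA_exit (arr : List Int) (Len av_index av_len : Int) :
    ∀ (fuel : Nat) (f w l r : Int), (arr.length : Int) ≤ r →
    outerA arr Len av_index av_len fuel f w l r = f := by
  intro fuel f w l r h
  cases fuel with
  | zero => simp [outerA]
  | succ fuel => simp only [outerA]; rw [if_neg (by omega)]

-- all indices of the list are in the skipped region: B's fold leaves best unchanged
theorem foldl_bstep_skip (arr : List Int) (Len av_index av_len : Int)
    (hai0 : 0 ≤ av_index) (hain : av_index < (arr.length : Int)) :
    ∀ (L : List Nat) (f : Int),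
    (∀ k ∈ L, av_index ≤ (k : Int) ∧ (k : Int) < av_index + av_len) →
    L.foldl (bstep arr Len av_index av_len) f = f := by
  intro L
  induction L with
  | nil => intro f _; simp
  | cons a L ih =>
      intro f h
      have ha := h a (by simp)
      simp only [List.foldl_cons]
      rw [show bstep arr Len av_index av_len f a = f by
        unfold bstep; rw [if_pos ⟨⟨hai0, hain⟩, ha.1, ha.2⟩]]
      exact ih f (fun k hk => h k (by simp [hk]))

theorem outerA_phase (arr : List Int) (Len av_index av_len seg : Int)
    (hLen : 0 ≤ Len) (hseg0 : 0 ≤ seg)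
    (hsegOf : ∀ k : Int, seg ≤ k → segB arr av_index av_len k = seg) :
    ∀ (fuel : Nat) (f w l r : Int), seg ≤ r →
    (∀ k : Int, r ≤ k → k < (arr.length : Int) → k ≠ av_index) →
    arr.length ≤ fuel + r.toNat →
    l = max seg (r - Len) → w = sTake arr r - sTake arr l →
    outerA arr Len av_index av_len fuel f w l r =
      (List.range' r.toNat (arr.length - r.toNat)).foldl (bstep arr Len av_index av_len) f := by
  intro fuel
  induction fuel with
  | zero =>
      intro f w l r hr hbar hfuel hl hw
      have : arr.length - r.toNat = 0 := by omega
      rw [this]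
      simp [outerA]
  | succ fuel ih =>
      intro f w l r hr hbar hfuel hl hw
      by_cases hrn : r < (arr.length : Int)
      · have hne : r ≠ av_index := hbar r (le_refl r) hrn
        simp only [outerA]
        rw [if_pos hrn, if_neg hne]
        simp only []
        rw [if_neg (by omega : ¬ (arr.length : Int) ≤ r)]
        have hl0 : 0 ≤ l := by omega
        have hlr : l ≤ r + 1 := by omega
        have hw1 : w + arr.getD r.toNat 0 = sTake arr (r + 1) - sTake arr l := by
          rw [sTake_succ arr r (by omega) hrn] at *
          rw [hw]; ring
        rw [innerA_eq arr Len r hLen (by omega) (arr.length + 1) _ l hl0 hlr (by omega) hw1]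
        have hL2 : max l (r + 1 - Len) = max seg (r + 1 - Len) := by omega
        rw [hL2]
        rw [ih (max (sTake arr (r + 1) - sTake arr (max seg (r + 1 - Len))) f) _ _ (r + 1)
            (by omega) (fun k hk hk2 => hbar k (by omega) hk2) (by omega)
            (by omega) rfl]
        rw [show (r + 1).toNat = r.toNat + 1 from by omega]
        -- peel the head index off the range on the RHS
        have hhead : List.range' r.toNat (arr.length - r.toNat) =
            r.toNat :: List.range' (r.toNat + 1) (arr.length - (r.toNat + 1)) := by
          have h1 : arr.length - r.toNat = (arr.length - (r.toNat + 1)) + 1 := by omega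
          rw [h1, List.range'_succ]
        rw [hhead, List.foldl_cons]
        congr 1
        have hrr : ((r.toNat : Int)) = r := by omega
        unfold bstep
        rw [hrr]
        rw [if_neg (by
          rintro ⟨h1, h2, h3⟩
          have h4 := hsegOf r hr
          unfold segB at h4
          rw [if_pos ⟨h1, h2⟩] at h4
          omega)]
        rw [hsegOf r hr]
        rw [show r - Len + 1 = r + 1 - Len from by ring]
        omega
      · rw [outerA_exit arr Len av_index av_len _ f w l r (by omega)]
        have : arr.length - r.toNat = 0 := by omega
        rw [this]
        simp

theorem outerA_barrier (arr : List Int) (Len av_index av_len : Int)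
    (hLen : 0 ≤ Len) (hai0 : 0 ≤ av_index) (hain : av_index < (arr.length : Int)) (hal : 0 ≤ av_len) :
    ∀ (fuel : Nat) (f w l r : Int), 0 ≤ r → r ≤ av_index →
    arr.length + 1 ≤ fuel + r.toNat →
    l = max 0 (r - Len) → w = sTake arr r - sTake arr l →
    outerA arr Len av_index av_len fuel f w l r =
      (List.range' r.toNat (arr.length - r.toNat)).foldl (bstep arr Len av_index av_len) f := by
  intro fuel
  induction fuel with
  | zero =>
      intro f w l r h0 hra hfuel hl hw
      exfalso; omega
  | succ fuel ih =>
      intro f w l r h0 hra hfuel hl hw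
      have hrn : r < (arr.length : Int) := by omega
      simp only [outerA]
      rw [if_pos hrn]
      by_cases hb : r = av_index
      · rw [if_pos hb]
        simp only []
        set j := r + av_len with hj
        have hjr : av_index ≤ j := by omega
        by_cases hjn : (arr.length : Int) ≤ j
        · rw [if_pos hjn]
          rw [outerA_exit arr Len av_index av_len _ f _ _ _ hjn]
          rw [foldl_bstep_skip arr Len av_index av_len hai0 hain _ f]
          intro k hk
          rw [List.mem_range'_1] at hk
          constructor <;> omega
        · rw [if_neg hjn]
          have hw1 : (0 : Int) + arr.getD j.toNat 0 = sTake arr (j + 1) - sTake arr j := by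
            rw [sTake_succ arr j (by omega) (by omega)]; ring
          rw [innerA_eq arr Len j hLen (by omega) (arr.length + 1) _ j (by omega) (by omega) (by omega) hw1]
          rw [outerA_phase arr Len av_index av_len j hLen (by omega)
              (by
                intro k hk
                unfold segB
                rw [if_pos ⟨⟨hai0, hain⟩, by omega⟩]
                omega)
              fuel _ _ _ (j + 1) (by omega)
              (fun k hk hk2 => by omega) (by omega) rfl rfl]
          rw [show (j + 1).toNat = j.toNat + 1 from by omega]
          -- RHS: skipped indices [av_index, j), then index j, then the rest
          have hsplit : List.range' r.toNat (arr.length - r.toNat) =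
              List.range' r.toNat (j.toNat - r.toNat) ++
              (j.toNat :: List.range' (j.toNat + 1) (arr.length - (j.toNat + 1))) := by
            have h2 : j.toNat = r.toNat + (j.toNat - r.toNat) := by omega
            rw [show arr.length - r.toNat = (j.toNat - r.toNat) + ((arr.length - (j.toNat + 1)) + 1) by omega]
            rw [← List.range'_append_1]
            congr 1
            rw [← h2, List.range'_succ]
          rw [hsplit, List.foldl_append]
          rw [foldl_bstep_skip arr Len av_index av_len hai0 hain _ f
              (by intro k hk; rw [List.mem_range'_1] at hk; constructor <;> omega)]
          rw [List.foldl_cons]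
          congr 1
          have hjj : ((j.toNat : Int)) = j := by omega
          unfold bstep segB
          rw [hjj]
          rw [if_neg (by rintro ⟨h1, h2, h3⟩; omega)]
          rw [if_pos ⟨⟨hai0, hain⟩, by omega⟩]
          rw [show j - Len + 1 = j + 1 - Len from by ring]
          rw [show av_index + av_len = j from by omega]
          omega
      · rw [if_neg hb]
        simp only []
        rw [if_neg (by omega : ¬ (arr.length : Int) ≤ r)]
        have hw1 : w + arr.getD r.toNat 0 = sTake arr (r + 1) - sTake arr l := by
          rw [sTake_succ arr r h0 hrn, hw]; ring
        rw [innerA_eq arr Len r hLen (by omega) (arr.length + 1) _ l (by omega) (by omega) (by omega) hw1]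
        rw [ih _ _ _ (r + 1) (by omega) (by omega) (by omega)
            (by omega) rfl]
        rw [show (r + 1).toNat = r.toNat + 1 from by omega]
        have hhead : List.range' r.toNat (arr.length - r.toNat) =
            r.toNat :: List.range' (r.toNat + 1) (arr.length - (r.toNat + 1)) := by
          rw [show arr.length - r.toNat = (arr.length - (r.toNat + 1)) + 1 by omega]
          rw [List.range'_succ]
        rw [hhead, List.foldl_cons]
        congr 1
        have hrr : ((r.toNat : Int)) = r := by omega
        unfold bstep segB
        rw [hrr]
        rw [if_neg (by rintro ⟨h1, h2, h3⟩; omega)]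
        rw [if_neg (by rintro ⟨h1, h2⟩; omega)]
        rw [show max l (r + 1 - Len) = max 0 (r - Len + 1) from by omega]
        omega

-- B's port computes the bstep fold
theorem alt_eq (arr : List Int) (Len av_index av_len : Int) (hLen : 0 ≤ Len) :
    max_window_alt arr Len av_index av_len =
      (List.range arr.length).foldl (bstep arr Len av_index av_len) 0 := by
  unfold max_window_alt
  simp only [decide_eq_true_eq]
  apply PySem.List.foldl_congr_mem
  intro best r hr
  rw [List.mem_range] at hr
  unfold bstep segB
  by_cases hsk : (0 ≤ av_index ∧ av_index < (arr.length : Int)) ∧ av_index ≤ (r : Int) ∧ (r : Int) < av_index + av_len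
  · rw [if_pos ⟨hsk.1, hsk.2.1, hsk.2.2⟩, if_pos hsk]
  · rw [if_neg (by tauto), if_neg hsk]
    by_cases hseg : (0 ≤ av_index ∧ av_index < (arr.length : Int)) ∧ av_index ≤ (r : Int)
    · rw [if_pos hseg]
      have hnr : av_index + av_len ≤ (r : Int) := by
        by_contra h; exact hsk ⟨hseg.1, hseg.2, by omega⟩
      have hle : (max (av_index + av_len) ((r : Int) - Len + 1)).toNat ≤ arr.length := by omega
      rw [prefixB_getD arr (r + 1) (by omega), prefixB_getD arr _ hle]
      unfold sTake
      congr 2 <;> omega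
    · rw [if_neg hseg]
      have hle : (max (0 : Int) ((r : Int) - Len + 1)).toNat ≤ arr.length := by omega
      rw [prefixB_getD arr (r + 1) (by omega), prefixB_getD arr _ hle]
      unfold sTake
      congr 2 <;> omega

-- ===== VERDICT (by name: the statement is the Claim_ definition above) =====
theorem max_window_spec : Claim_equal_max_window := by
  intro arr Len av_index av_len _hDom hPre
  unfold Spec_max_window
  by_cases harr : arr = []
  · subst harr
    simp [max_window, max_window_alt, outerA]
  · have hLen : 0 ≤ Len := hPre.1.resolve_right harr
    rw [alt_eq arr Len av_index av_len hLen]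
    unfold max_window
    rw [List.range_eq_range']
    by_cases hbar : 0 ≤ av_index ∧ av_index < (arr.length : Int)
    · have hal : 0 ≤ av_len := hPre.2.resolve_right (by tauto)
      have := outerA_barrier arr Len av_index av_len hLen hbar.1 hbar.2 hal
        (arr.length + 2) 0 0 0 0 (le_refl 0) hbar.1 (by omega) (by omega)
        (by simp [sTake])
      simpa using this
    · have := outerA_phase arr Len av_index av_len 0 hLen (le_refl 0)
        (by intro k _; unfold segB; rw [if_neg (by tauto)])
        (arr.length + 2) 0 0 0 0 (le_refl 0)
        (by intro k _ hk2 hke; exact hbar ⟨by omega, by omega⟩)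
        (by omega) (by omega) (by simp [sTake])
      simpa using this
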